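-- pv_equiv track=rewrite | github.com/Olivex727/Critical_Statum-Contagion | main.py | loc_check
-- ===== SOURCE A (Python) =====
-- def loc_check(s, a, b):
--   x = 1
--   p = 0
--   while x <= 5:
--     p = x
--     if a in area[s][p] and b in area[s][p]:
--       return True
--     x = x + 1
--     p = 0
--   return False
--
-- area = {
--   'wolosyd':{
--     1:['sutherland park', 'otford', 'heathcote', 'campbeltown', 'ruins'],
--     2:['central', 'kembla-kiama', 'nowra'],
--     3:['port hacking', 'old bay', 'parramatta', 'avalon', 'penrith', 'richmond'],
--     4:['bowral', 'picton', 'mountains'],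
--     5:['tenex', 'offices', 'storage', 'head office', 'security room', 'security bay']
--   },
--   'tariskor':{
--     1:['loading bay', 'mt. rextion', 'command center'],
--     2:['storage', 'metal factory', 'rextion port'],
--     3:['vulcan plains', 'mt. vulcan', 'vestic stockyard', 'mt. vestic'],
--     4:[],
--     5:[]
--   },
--   'musk':{
--     1:['town hall', 'asimov', 'south musk'],
--     2:['wells airport', 'city limit'],
--     3:['cerberus plateau', 'landing site'],
--     4:[],
--     5:[]
--   },
--   'ventrin-426b':{
--     1:['landing pad', 'cliffside', 'cavern', 'unknown location', 'lab entrance'],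
--     2:['hall', 'lab 1', 'lab 2', 'lab 3', 'lab 4', 'study', 'lab #!@%'],
--     3:['bridge', 'vault door', 'test room'],
--     4:[],
--     5:[]
--   },
--   'lab':{
--     1:['hall', 'quarters', 'common room', 'storeroom'],
--     2:['lab 6'],
--     3:['test chamber'],
--     4:['vault door'],
--     5:[]
--   },
--   'spiron city':{
--     1:['mt. serins', 'outpost'],
--     2:['ventrix', 'city entrance', 'sector 3', 'sector 4', 'industrial', 'sector 6', 'central spiron', 'landing bay'],
--     3:['zoo'],
--     4:['larina'],
--     5:['junkyard', 'warehouse']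
--   }
-- }
-- ===== SOURCE B (Python) =====
-- # The region table rewritten as an index: per region, a flat dict mapping each
-- # location name directly to its subregion number.
-- SUBREGION = {
--   'wolosyd': {'sutherland park': 1, 'otford': 1, 'heathcote': 1, 'campbeltown': 1, 'ruins': 1, 'central': 2, 'kembla-kiama': 2, 'nowra': 2, 'port hacking': 3, 'old bay': 3, 'parramatta': 3, 'avalon': 3, 'penrith': 3, 'richmond': 3, 'bowral': 4, 'picton': 4, 'mountains': 4, 'tenex': 5, 'offices': 5, 'storage': 5, 'head office': 5, 'security room': 5, 'security bay': 5},
--   'tariskor': {'loading bay': 1, 'mt. rextion': 1, 'command center': 1, 'storage': 2, 'metal factory': 2, 'rextion port': 2, 'vulcan plains': 3, 'mt. vulcan': 3, 'vestic stockyard': 3, 'mt. vestic': 3},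
--   'musk': {'town hall': 1, 'asimov': 1, 'south musk': 1, 'wells airport': 2, 'city limit': 2, 'cerberus plateau': 3, 'landing site': 3},
--   'ventrin-426b': {'landing pad': 1, 'cliffside': 1, 'cavern': 1, 'unknown location': 1, 'lab entrance': 1, 'hall': 2, 'lab 1': 2, 'lab 2': 2, 'lab 3': 2, 'lab 4': 2, 'study': 2, 'lab #!@%': 2, 'bridge': 3, 'vault door': 3, 'test room': 3},
--   'lab': {'hall': 1, 'quarters': 1, 'common room': 1, 'storeroom': 1, 'lab 6': 2, 'test chamber': 3, 'vault door': 4},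
--   'spiron city': {'mt. serins': 1, 'outpost': 1, 'ventrix': 2, 'city entrance': 2, 'sector 3': 2, 'sector 4': 2, 'industrial': 2, 'sector 6': 2, 'central spiron': 2, 'landing bay': 2, 'zoo': 3, 'larina': 4, 'junkyard': 5, 'warehouse': 5},
-- }
-- def loc_check(s, a, b):
--     d = SUBREGION[s]
--     return a in d and d.get(a) == d.get(b)
-- ===== Notes on version B (the rewrite author's own statement) =====
-- stated objective: simpler
-- what changed: A scans the five subregion lists testing membership of both names in each with an early-return while loop; B restructures the data table into a per-region index dict mapping each location name to its subregion number and answers with two lookups compared, correct because each region's subregion lists are pairwise disjoint.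
import Mathlib
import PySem

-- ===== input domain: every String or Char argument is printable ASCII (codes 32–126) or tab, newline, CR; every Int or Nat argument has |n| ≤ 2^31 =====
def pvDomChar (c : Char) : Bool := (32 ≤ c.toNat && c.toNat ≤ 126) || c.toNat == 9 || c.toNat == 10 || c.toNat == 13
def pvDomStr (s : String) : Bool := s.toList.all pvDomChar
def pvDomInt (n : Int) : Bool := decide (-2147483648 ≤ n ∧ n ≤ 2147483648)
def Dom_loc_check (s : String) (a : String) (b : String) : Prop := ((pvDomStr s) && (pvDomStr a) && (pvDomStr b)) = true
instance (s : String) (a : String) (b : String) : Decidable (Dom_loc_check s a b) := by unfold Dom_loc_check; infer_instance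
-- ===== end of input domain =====

-- B replaces A's per-subregion pair-membership scan by a restructured data table:
-- a per-region index dict mapping each location name to its subregion number, looked
-- up once for a and once for b and compared; equal because each region's subregion
-- lists are pairwise disjoint. Objective: simpler. Equivalence on Pre_ (valid region names).

-- ===== PORT A =====
-- the module constant `area` exactly as A stores it: region -> (subregion number -> list of names)
def regWolosyd : PySem.Dict Int (List String) := PySem.Dict.ofList
  [(1, ["sutherland park", "otford", "heathcote", "campbeltown", "ruins"]),
   (2, ["central", "kembla-kiama", "nowra"]),
   (3, ["port hacking", "old bay", "parramatta", "avalon", "penrith", "richmond"]),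
   (4, ["bowral", "picton", "mountains"]),
   (5, ["tenex", "offices", "storage", "head office", "security room", "security bay"])]
def regTariskor : PySem.Dict Int (List String) := PySem.Dict.ofList
  [(1, ["loading bay", "mt. rextion", "command center"]),
   (2, ["storage", "metal factory", "rextion port"]),
   (3, ["vulcan plains", "mt. vulcan", "vestic stockyard", "mt. vestic"]),
   (4, []), (5, [])]
def regMusk : PySem.Dict Int (List String) := PySem.Dict.ofList
  [(1, ["town hall", "asimov", "south musk"]),
   (2, ["wells airport", "city limit"]),
   (3, ["cerberus plateau", "landing site"]),
   (4, []), (5, [])]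
def regVentrin : PySem.Dict Int (List String) := PySem.Dict.ofList
  [(1, ["landing pad", "cliffside", "cavern", "unknown location", "lab entrance"]),
   (2, ["hall", "lab 1", "lab 2", "lab 3", "lab 4", "study", "lab #!@%"]),
   (3, ["bridge", "vault door", "test room"]),
   (4, []), (5, [])]
def regLab : PySem.Dict Int (List String) := PySem.Dict.ofList
  [(1, ["hall", "quarters", "common room", "storeroom"]),
   (2, ["lab 6"]),
   (3, ["test chamber"]),
   (4, ["vault door"]),
   (5, [])]
def regSpiron : PySem.Dict Int (List String) := PySem.Dict.ofList
  [(1, ["mt. serins", "outpost"]),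
   (2, ["ventrix", "city entrance", "sector 3", "sector 4", "industrial", "sector 6", "central spiron", "landing bay"]),
   (3, ["zoo"]),
   (4, ["larina"]),
   (5, ["junkyard", "warehouse"])]
def areaA : PySem.Dict String (PySem.Dict Int (List String)) := PySem.Dict.ofList
  [("wolosyd", regWolosyd), ("tariskor", regTariskor), ("musk", regMusk),
   ("ventrin-426b", regVentrin), ("lab", regLab), ("spiron city", regSpiron)]

-- the while loop: x from 1 to 5; area[s][p] — key p is present in every region of the
-- literal dict, so getD is exact here
def locLoopA (a b : String) (region : PySem.Dict Int (List String)) (x : Nat) : Bool :=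
  if _h : x ≤ 5 then
    let sub := region.getD (x : Int) []
    if sub.contains a && sub.contains b then true
    else locLoopA a b region (x + 1)
  else false
termination_by 6 - x
decreasing_by omega

def loc_check (s : String) (a : String) (b : String) : Bool :=
  match areaA.get? s with
  | none => false   -- Python raises KeyError here; excluded by Pre_
  | some region => locLoopA a b region 1

-- ===== PORT B =====
-- Source B's module constant SUBREGION: per region, a flat index mapping each location
-- name directly to its subregion number
def idxWolosyd : PySem.Dict String Int := PySem.Dict.ofList
  [("sutherland park", 1), ("otford", 1), ("heathcote", 1), ("campbeltown", 1), ("ruins", 1), ("central", 2), ("kembla-kiama", 2), ("nowra", 2), ("port hacking", 3), ("old bay", 3), ("parramatta", 3), ("avalon", 3), ("penrith", 3), ("richmond", 3), ("bowral", 4), ("picton", 4), ("mountains", 4), ("tenex", 5), ("offices", 5), ("storage", 5), ("head office", 5), ("security room", 5), ("security bay", 5)]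
def idxTariskor : PySem.Dict String Int := PySem.Dict.ofList
  [("loading bay", 1), ("mt. rextion", 1), ("command center", 1), ("storage", 2), ("metal factory", 2), ("rextion port", 2), ("vulcan plains", 3), ("mt. vulcan", 3), ("vestic stockyard", 3), ("mt. vestic", 3)]
def idxMusk : PySem.Dict String Int := PySem.Dict.ofList
  [("town hall", 1), ("asimov", 1), ("south musk", 1), ("wells airport", 2), ("city limit", 2), ("cerberus plateau", 3), ("landing site", 3)]
def idxVentrin : PySem.Dict String Int := PySem.Dict.ofList
  [("landing pad", 1), ("cliffside", 1), ("cavern", 1), ("unknown location", 1), ("lab entrance", 1), ("hall", 2), ("lab 1", 2), ("lab 2", 2), ("lab 3", 2), ("lab 4", 2), ("study", 2), ("lab #!@%", 2), ("bridge", 3), ("vault door", 3), ("test room", 3)]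
def idxLab : PySem.Dict String Int := PySem.Dict.ofList
  [("hall", 1), ("quarters", 1), ("common room", 1), ("storeroom", 1), ("lab 6", 2), ("test chamber", 3), ("vault door", 4)]
def idxSpiron : PySem.Dict String Int := PySem.Dict.ofList
  [("mt. serins", 1), ("outpost", 1), ("ventrix", 2), ("city entrance", 2), ("sector 3", 2), ("sector 4", 2), ("industrial", 2), ("sector 6", 2), ("central spiron", 2), ("landing bay", 2), ("zoo", 3), ("larina", 4), ("junkyard", 5), ("warehouse", 5)]
def subIndex : PySem.Dict String (PySem.Dict String Int) := PySem.Dict.ofList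
  [("wolosyd", idxWolosyd), ("tariskor", idxTariskor), ("musk", idxMusk), ("ventrin-426b", idxVentrin), ("lab", idxLab), ("spiron city", idxSpiron)]

-- d = SUBREGION[s]; return a in d and d.get(a) == d.get(b)
def loc_check_alt (s : String) (a : String) (b : String) : Bool :=
  match subIndex.get? s with
  | none => false   -- Python raises KeyError here; excluded by Pre_
  | some d => d.contains a && (d.get? a == d.get? b)

-- ===== PRECONDITION & SPEC =====
-- Pre_ excludes exactly the region names absent from `area`, on which A raises KeyError
def Pre_loc_check (s : String) (a : String) (b : String) : Prop :=
  s = "wolosyd" ∨ s = "tariskor" ∨ s = "musk" ∨ s = "ventrin-426b" ∨ s = "lab" ∨ s = "spiron city"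
instance (s : String) (a : String) (b : String) : Decidable (Pre_loc_check s a b) := by
  unfold Pre_loc_check; infer_instance
def pvWitness_loc_check : String × String × String := ("wolosyd", "central", "nowra")

def Spec_loc_check (s : String) (a : String) (b : String) (out : Bool) : Prop := out = loc_check_alt s a b
instance (s : String) (a : String) (b : String) (out : Bool) : Decidable (Spec_loc_check s a b out) := by unfold Spec_loc_check; infer_instance

-- ===== CLAIM (what is proved, stated in full; the proofs are below) =====
def Claim_equal_loc_check : Prop := ∀ (s : String) (a : String) (b : String), Dom_loc_check s a b → Pre_loc_check s a b → Spec_loc_check s a b (loc_check s a b)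

-- ===== LEMMAS AND PROOFS =====

def flatIdx (PL : List (Int × List String)) : List (String × Int) :=
  PL.flatMap (fun x => x.2.map (fun n => (n, x.1)))

def lookupF (pairs : List (String × Int)) (k : String) : Option Int :=
  (pairs.find? (fun kv => kv.1 == k)).map Prod.snd

theorem find?_map_pair (L : List String) (p : Int) (k : String) :
    ((L.map (fun n => (n, p))).find? (fun kv => kv.1 == k))
      = if L.contains k then some (k, p) else none := by
  induction L with
  | nil => simp
  | cons n L ih =>
    by_cases h : n = k
    · subst h; simp [List.find?_cons]
    · simp [List.find?_cons, h, ih, Ne.symm h]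

theorem lookupF_cons (L : List String) (p : Int) (rest : List (String × Int)) (k : String) :
    lookupF ((L.map (fun n => (n, p))) ++ rest) k
      = if L.contains k then some p else lookupF rest k := by
  unfold lookupF
  rw [List.find?_append, find?_map_pair]
  by_cases h : k ∈ L <;> simp [h]

theorem lookupF_flat_mem (PL : List (Int × List String)) (k : String) (v : Int)
    (h : lookupF (flatIdx PL) k = some v) : v ∈ PL.map Prod.fst := by
  induction PL with
  | nil => simp [lookupF, flatIdx] at h
  | cons x PL ih =>
    unfold flatIdx at h
    rw [List.flatMap_cons, lookupF_cons] at h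
    by_cases hc : k ∈ x.2
    · simp only [List.contains_eq_mem, hc, decide_true, if_true] at h
      simp at h
      simp [h]
    · simp only [List.contains_eq_mem, hc, decide_false, Bool.false_eq_true, if_false] at h
      exact List.mem_cons_of_mem _ (ih h)

theorem main_eq (PL : List (Int × List String)) (a b : String)
    (hnd : (PL.map Prod.fst).Nodup)
    (hdisj : PL.Pairwise (fun x y => ∀ n ∈ x.2, n ∉ y.2)) :
    (PL.map Prod.snd).any (fun L => L.contains a && L.contains b)
      = ((lookupF (flatIdx PL) a).isSome
          && (lookupF (flatIdx PL) a == lookupF (flatIdx PL) b)) := by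
  induction PL with
  | nil => rfl
  | cons x PL ih =>
    rcases List.pairwise_cons.mp hdisj with ⟨hhead, htail⟩
    rcases List.nodup_cons.mp hnd with ⟨hpx, hndt⟩
    have hflat : flatIdx (x :: PL) = (x.2.map (fun n => (n, x.1))) ++ flatIdx PL := by
      simp only [flatIdx, List.flatMap_cons]
    rw [List.map_cons, List.any_cons, hflat, lookupF_cons, lookupF_cons]
    have tailfalse : (a ∈ x.2 ∨ b ∈ x.2) →
        ((PL.map Prod.snd).any (fun L => L.contains a && L.contains b)) = false := by
      intro hc
      rw [List.any_eq_false]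
      intro L hL
      rcases List.mem_map.mp hL with ⟨y, hy, rfl⟩
      rcases hc with h | h
      · simp [hhead y hy a h]
      · simp [hhead y hy b h]
    by_cases ha : a ∈ x.2
    · by_cases hb : b ∈ x.2
      · simp [ha, hb]
      · rw [tailfalse (Or.inl ha)]
        cases hr : lookupF (flatIdx PL) b with
        | none => simp [ha, hb, hr]
        | some v =>
          have hv := lookupF_flat_mem PL b v hr
          have hne : x.1 ≠ v := fun he => hpx (he ▸ hv)
          simp [ha, hb, hr, hne]
    · by_cases hb : b ∈ x.2
      · rw [tailfalse (Or.inr hb)]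
        cases hr : lookupF (flatIdx PL) a with
        | none => simp [ha, hb, hr]
        | some v =>
          have hv := lookupF_flat_mem PL a v hr
          have hne : v ≠ x.1 := fun he => hpx (he ▸ hv)
          simp [ha, hb, hr, hne]
      · simpa [ha, hb] using ih hndt htail

-- per-region reduction: A's loop on a concrete region = B's lookup-compare on its index
theorem loopA_eq_any (a b : String) (region : PySem.Dict Int (List String)) :
    locLoopA a b region 1
      = (([1, 2, 3, 4, 5] : List Int).map (fun p => region.getD p [])).any
          (fun L => L.contains a && L.contains b) := by
  simp [locLoopA, List.any_cons]

theorem get?_mk_eq_lookupF (pairs : List (String × Int)) (k : String) :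
    (PySem.Dict.mk pairs).get? k = lookupF pairs k := by
  induction pairs with
  | nil => rfl
  | cons kv pairs ih =>
    rw [show (kv :: pairs) = ((kv.1, kv.2) :: pairs) from by simp,
        PySem.Dict.get?_mk_cons]
    unfold lookupF
    rw [List.find?_cons]
    by_cases h : kv.1 == k <;> simp [h, ih, lookupF]

theorem region_eq (reg : PySem.Dict Int (List String)) (idx : PySem.Dict String Int)
    (PL : List (Int × List String))
    (h1 : ([1, 2, 3, 4, 5] : List Int).map (fun p => reg.getD p []) = PL.map Prod.snd)
    (h2 : idx = PySem.Dict.mk (flatIdx PL))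
    (hnd : (PL.map Prod.fst).Nodup)
    (hdisj : PL.Pairwise (fun x y => ∀ n ∈ x.2, n ∉ y.2))
    (a b : String) :
    locLoopA a b reg 1 = (idx.contains a && (idx.get? a == idx.get? b)) := by
  rw [loopA_eq_any, h1, main_eq PL a b hnd hdisj, h2,
      PySem.Dict.contains_eq_isSome_get?, get?_mk_eq_lookupF, get?_mk_eq_lookupF]

-- ===== VERDICT (by name: the statement is the Claim_ definition above) =====
theorem loc_check_spec : Claim_equal_loc_check := by
  intro s a b _hdom hpre
  unfold Spec_loc_check loc_check loc_check_alt
  rcases hpre with h | h | h | h | h | h <;> subst h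
  · rw [show areaA.get? "wolosyd" = some regWolosyd from by decide,
        show subIndex.get? "wolosyd" = some idxWolosyd from by decide]
    exact region_eq _ _ [(1, ["sutherland park", "otford", "heathcote", "campbeltown", "ruins"]), (2, ["central", "kembla-kiama", "nowra"]), (3, ["port hacking", "old bay", "parramatta", "avalon", "penrith", "richmond"]), (4, ["bowral", "picton", "mountains"]), (5, ["tenex", "offices", "storage", "head office", "security room", "security bay"])] (by decide) (by decide) (by decide) (by decide) a b
  · rw [show areaA.get? "tariskor" = some regTariskor from by decide,
        show subIndex.get? "tariskor" = some idxTariskor from by decide]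
    exact region_eq _ _ [(1, ["loading bay", "mt. rextion", "command center"]), (2, ["storage", "metal factory", "rextion port"]), (3, ["vulcan plains", "mt. vulcan", "vestic stockyard", "mt. vestic"]), (4, []), (5, [])] (by decide) (by decide) (by decide) (by decide) a b
  · rw [show areaA.get? "musk" = some regMusk from by decide,
        show subIndex.get? "musk" = some idxMusk from by decide]
    exact region_eq _ _ [(1, ["town hall", "asimov", "south musk"]), (2, ["wells airport", "city limit"]), (3, ["cerberus plateau", "landing site"]), (4, []), (5, [])] (by decide) (by decide) (by decide) (by decide) a b
  · rw [show areaA.get? "ventrin-426b" = some regVentrin from by decide,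
        show subIndex.get? "ventrin-426b" = some idxVentrin from by decide]
    exact region_eq _ _ [(1, ["landing pad", "cliffside", "cavern", "unknown location", "lab entrance"]), (2, ["hall", "lab 1", "lab 2", "lab 3", "lab 4", "study", "lab #!@%"]), (3, ["bridge", "vault door", "test room"]), (4, []), (5, [])] (by decide) (by decide) (by decide) (by decide) a b
  · rw [show areaA.get? "lab" = some regLab from by decide,
        show subIndex.get? "lab" = some idxLab from by decide]
    exact region_eq _ _ [(1, ["hall", "quarters", "common room", "storeroom"]), (2, ["lab 6"]), (3, ["test chamber"]), (4, ["vault door"]), (5, [])] (by decide) (by decide) (by decide) (by decide) a b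
  · rw [show areaA.get? "spiron city" = some regSpiron from by decide,
        show subIndex.get? "spiron city" = some idxSpiron from by decide]
    exact region_eq _ _ [(1, ["mt. serins", "outpost"]), (2, ["ventrix", "city entrance", "sector 3", "sector 4", "industrial", "sector 6", "central spiron", "landing bay"]), (3, ["zoo"]), (4, ["larina"]), (5, ["junkyard", "warehouse"])] (by decide) (by decide) (by decide) (by decide) a b
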